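-- pv_equiv track=rewrite | github.com/jade-law/Python | HW06_TryExceptAndDicts.py | animal_locator
-- ===== SOURCE A (Python) =====
-- def animal_locator(dict):
--     aniCounts = list(dict.values())
--     places = list(dict.keys())
--     newdict = {}
--     finaldict = {}
--     plist = []
--     total = 0
--     for i in range(len(aniCounts)):
--         for (animal, count) in aniCounts[i]:
--             if animal in newdict.keys():
--                 newdict[animal].append((places[i], count))
--             else:
--                 newdict[animal] = [(places[i], count)]
--     for each in newdict.keys():
--         newdict[each] = sorted(newdict[each], key=lambda x: x[1], reverse = True)
--         plist = [p for (p, n) in newdict[each]]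
--         for (p, n) in newdict[each]:
--             total += n
--         finaldict[each] = (plist, total)
--         total = 0
--     return finaldict
-- ===== SOURCE B (Python) =====
-- def animal_locator(dict):
--     # flatten once, fix animal first-appearance order, one global stable sort, one grouping pass
--     triples = []
--     placelists = {}
--     totals = {}
--     for place, pairs in dict.items():
--         for animal, count in pairs:
--             triples.append((animal, place, count))
--             if animal not in placelists:
--                 placelists[animal] = []
--                 totals[animal] = 0
--     triples.sort(key=lambda t: t[2], reverse=True)
--     for animal, place, count in triples:
--         placelists[animal].append(place)
--         totals[animal] += count
--     return {a: (ps, totals[a]) for a, ps in placelists.items()}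
-- ===== Notes on version B (the rewrite author's own statement) =====
-- stated objective: alternative
-- what changed: A groups (place,count) pairs per animal and then sorts each animal's group separately; B flattens the dict into (animal,place,count) triples, does ONE global stable sort by count descending, and recovers every animal's descending place-list and total in a single linear grouping pass (stability of the global sort preserves A's per-group tie order).
import Mathlib
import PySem

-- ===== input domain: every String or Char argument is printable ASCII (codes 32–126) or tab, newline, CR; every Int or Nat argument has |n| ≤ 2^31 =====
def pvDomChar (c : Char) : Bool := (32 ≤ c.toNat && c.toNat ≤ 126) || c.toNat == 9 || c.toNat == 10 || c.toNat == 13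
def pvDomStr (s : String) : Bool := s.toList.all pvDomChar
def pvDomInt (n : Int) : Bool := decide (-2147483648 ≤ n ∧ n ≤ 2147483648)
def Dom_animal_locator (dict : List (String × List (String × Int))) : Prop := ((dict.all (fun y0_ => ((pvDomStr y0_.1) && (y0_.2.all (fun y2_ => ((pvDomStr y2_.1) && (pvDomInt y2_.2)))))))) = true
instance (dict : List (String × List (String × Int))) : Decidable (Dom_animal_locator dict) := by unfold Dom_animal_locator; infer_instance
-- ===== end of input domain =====

-- B replaces A's per-animal sorts (group first, then sort each group) by one global stable
-- sort of the flattened (animal, place, count) triples followed by a single grouping pass.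

-- ===== PORT A =====
def animal_locator (dict : List (String × List (String × Int))) : List (String × List String × Int) :=
  let d := PySem.Dict.ofList dict
  let aniCounts := d.values
  let places := d.keys
  let newdict : PySem.Dict String (List (String × Int)) :=
    (PySem.List.pyRange 0 (PySem.List.len aniCounts)).foldl (fun nd i =>
      (PySem.List.pyGetD aniCounts i []).foldl (fun nd ac =>
        if nd.contains ac.1 then
          nd.modify ac.1 [] (fun l => l ++ [(PySem.List.pyGetD places i "", ac.2)])
        else
          nd.insert ac.1 [(PySem.List.pyGetD places i "", ac.2)]) nd)
      PySem.Dict.empty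
  let res :=
    newdict.keys.foldl
      (fun (st : PySem.Dict String (List (String × Int)) × PySem.Dict String (List String × Int)) each =>
        let sortedv := PySem.List.sorted (st.1.getD each []) (fun x => x.2) true
        let nd := st.1.insert each sortedv
        let plist := sortedv.map (fun pn => pn.1)
        let total := sortedv.foldl (fun t pn => t + pn.2) 0
        (nd, st.2.insert each (plist, total)))
      (newdict, PySem.Dict.empty)
  res.2.items

-- ===== PORT B =====
def animal_locator_alt (dict : List (String × List (String × Int))) : List (String × List String × Int) :=
  let d := PySem.Dict.ofList dict
  -- flatten to (animal, place, count) triples; record first appearance of each animal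
  let st0 := d.items.foldl
    (fun (st : List (String × String × Int) × PySem.Dict String (List String) × PySem.Dict String Int) pr =>
      pr.2.foldl (fun st ac =>
        ( st.1 ++ [(ac.1, pr.1, ac.2)],
          if st.2.1.contains ac.1 then st.2 else (st.2.1.insert ac.1 [], st.2.2.insert ac.1 0))) st)
    ([], PySem.Dict.empty, PySem.Dict.empty)
  -- one global stable sort by count, descending
  let triples := PySem.List.sorted st0.1 (fun t => t.2.2) true
  -- single grouping pass
  let st1 := triples.foldl
    (fun (st : PySem.Dict String (List String) × PySem.Dict String Int) t =>
      (st.1.modify t.1 [] (fun l => l ++ [t.2.1]), st.2.modify t.1 0 (fun n => n + t.2.2)))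
    (st0.2.1, st0.2.2)
  st1.1.items.map (fun ap => (ap.1, ap.2, st1.2.getD ap.1 0))

-- ===== PRECONDITION & SPEC =====
def Spec_animal_locator (dict : List (String × List (String × Int))) (out : List (String × List String × Int)) : Prop := out = animal_locator_alt dict
instance (dict : List (String × List (String × Int))) (out : List (String × List String × Int)) : Decidable (Spec_animal_locator dict out) := by unfold Spec_animal_locator; infer_instance

-- ===== CLAIM (what is proved, stated in full; the proofs are below) =====
def Claim_equal_animal_locator : Prop := ∀ (dict : List (String × List (String × Int))), Dom_animal_locator dict → Spec_animal_locator dict (animal_locator dict)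

-- ===== LEMMAS AND PROOFS =====

theorem pvIns_head {α κ : Type} [LinearOrder κ] (key : α → κ) (x : α) (ys : List α)
    (h : ∀ y ∈ ys, key y < key x) :
    PySem.List.insertBy (fun a b => decide (key b < key a)) x ys = x :: ys := by
  cases ys with
  | nil => rfl
  | cons a t =>
    simp [PySem.List.insertBy, h a (by simp)]

theorem pvIns_filter {α κ : Type} [LinearOrder κ] (key : α → κ) (p : α → Bool) (x : α) :
    ∀ (ys : List α), ys.Pairwise (fun a b => key b ≤ key a) →
    (PySem.List.insertBy (fun a b => decide (key b < key a)) x ys).filter p =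
      if p x then PySem.List.insertBy (fun a b => decide (key b < key a)) x (ys.filter p)
      else ys.filter p := by
  intro ys
  induction ys with
  | nil => intro _; by_cases hp : p x <;> simp [PySem.List.insertBy, hp]
  | cons a t ih =>
    intro hpw
    rw [List.pairwise_cons] at hpw
    by_cases hb : key a < key x
    · have hall : ∀ y ∈ a :: t, key y < key x := by
        intro y hy
        rcases List.mem_cons.mp hy with rfl | hy
        · exact hb
        · exact lt_of_le_of_lt (hpw.1 y hy) hb
      rw [show PySem.List.insertBy (fun a b => decide (key b < key a)) x (a :: t) = x :: a :: t by
        simp [PySem.List.insertBy, hb]]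
      by_cases hp : p x
      · have : ∀ y ∈ (a :: t).filter p, key y < key x := by
          intro y hy; exact hall y (List.mem_of_mem_filter hy)
        rw [pvIns_head key x _ this]
        simp [hp]
      · simp [hp]
    · rw [show PySem.List.insertBy (fun a b => decide (key b < key a)) x (a :: t) =
          a :: PySem.List.insertBy (fun a b => decide (key b < key a)) x t by
        simp [PySem.List.insertBy, hb]]
      have iht := ih hpw.2
      by_cases hp : p x <;> by_cases hpa : p a <;>
        simp [hp, hpa, iht, PySem.List.insertBy, hb]

theorem pvSorted_filter {α κ : Type} [LinearOrder κ] (key : α → κ) (p : α → Bool) (l : List α) :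
    (PySem.List.sorted l key true).filter p = PySem.List.sorted (l.filter p) key true := by
  induction l using List.reverseRecOn with
  | nil => rfl
  | append_singleton l x ih =>
    rw [PySem.List.sorted_rev_eq_foldl_insertBy, List.foldl_append,
      ← PySem.List.sorted_rev_eq_foldl_insertBy]
    simp only [List.foldl_cons, List.foldl_nil]
    rw [pvIns_filter key p x _ (PySem.List.sorted_pairwise_rev l key), ih]
    by_cases hp : p x
    · rw [List.filter_append, PySem.List.sorted_rev_eq_foldl_insertBy (l.filter p ++ _),
        List.foldl_append, ← PySem.List.sorted_rev_eq_foldl_insertBy]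
      simp [hp]
    · simp [List.filter_append, hp]

theorem pvIns_map {α β κ : Type} [LinearOrder κ] (key : β → κ) (g : α → β) (x : α) :
    ∀ (ys : List α),
    PySem.List.insertBy (fun a b => decide (key b < key a)) (g x) (ys.map g) =
      (PySem.List.insertBy (fun a b => decide (key (g b) < key (g a))) x ys).map g := by
  intro ys
  induction ys with
  | nil => rfl
  | cons a t ih =>
    by_cases hb : key (g a) < key (g x) <;> simp [PySem.List.insertBy, hb, ih]

theorem pvSorted_map {α β κ : Type} [LinearOrder κ] (key : β → κ) (g : α → β) (l : List α) :
    PySem.List.sorted (l.map g) key true = (PySem.List.sorted l (fun x => key (g x)) true).map g := by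
  induction l using List.reverseRecOn with
  | nil => rfl
  | append_singleton l x ih =>
    rw [List.map_append, PySem.List.sorted_rev_eq_foldl_insertBy, List.foldl_append,
      ← PySem.List.sorted_rev_eq_foldl_insertBy, PySem.List.sorted_rev_eq_foldl_insertBy (l ++ [x]),
      List.foldl_append, ← PySem.List.sorted_rev_eq_foldl_insertBy]
    simp only [List.map_cons, List.map_nil, List.foldl_cons, List.foldl_nil]
    rw [ih, pvIns_map]

def pvFlat (items : List (String × List (String × Int))) : List (String × String × Int) :=
  items.flatMap (fun pr => pr.2.map (fun ac => (ac.1, pr.1, ac.2)))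

theorem pvModIf (nd : PySem.Dict String (List (String × Int))) (k : String) (v : String × Int) :
    (if nd.contains k then nd.modify k [] (fun l => l ++ [v]) else nd.insert k [v]) =
      nd.modify k [] (fun l => l ++ [v]) := by
  by_cases h : nd.contains k
  · rw [if_pos h]
  · rw [if_neg h]
    simp [PySem.Dict.modify, PySem.Dict.getD_of_not_contains _ _ (by simpa using h)]

theorem pvA_newdict (items : List (String × List (String × Int)))
    (nd0 : PySem.Dict String (List (String × Int))) :
    (PySem.List.pyRange 0 (PySem.List.len (items.map (fun x => x.2)))).foldl
      (fun nd i => (PySem.List.pyGetD (items.map (fun x => x.2)) i []).foldl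
        (fun nd ac =>
          if nd.contains ac.1 then
            nd.modify ac.1 [] (fun l => l ++ [(PySem.List.pyGetD (items.map (fun x => x.1)) i "", ac.2)])
          else
            nd.insert ac.1 [(PySem.List.pyGetD (items.map (fun x => x.1)) i "", ac.2)]) nd) nd0
    = (pvFlat items).foldl (fun nd p => nd.modify p.1 [] (fun l => l ++ [p.2])) nd0 := by
  have hlen : PySem.List.len (items.map (fun x => x.2)) = PySem.List.len items := by
    simp [PySem.List.len]
  rw [hlen]
  have hbody : (fun (nd : PySem.Dict String (List (String × Int))) (i : Int) =>
      (PySem.List.pyGetD (items.map (fun x => x.2)) i []).foldl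
        (fun nd ac =>
          if nd.contains ac.1 then
            nd.modify ac.1 [] (fun l => l ++ [(PySem.List.pyGetD (items.map (fun x => x.1)) i "", ac.2)])
          else
            nd.insert ac.1 [(PySem.List.pyGetD (items.map (fun x => x.1)) i "", ac.2)]) nd)
    = (fun nd i =>
        (fun (nd : PySem.Dict String (List (String × Int))) (pr : String × List (String × Int)) =>
          pr.2.foldl (fun nd ac => nd.modify ac.1 [] (fun l => l ++ [(pr.1, ac.2)])) nd)
        nd (PySem.List.pyGetD items i ("", []))) := by
    funext nd i
    have h2 : PySem.List.pyGetD (items.map (fun x => x.2)) i [] =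
        (PySem.List.pyGetD items i ("", [])).2 :=
      PySem.List.pyGetD_map (fun x => x.2) items i ("", [])
    have h1 : PySem.List.pyGetD (items.map (fun x => x.1)) i "" =
        (PySem.List.pyGetD items i ("", [])).1 :=
      PySem.List.pyGetD_map (fun x => x.1) items i ("", [])
    rw [h1, h2]
    simp only [pvModIf]
  rw [hbody]
  refine (PySem.List.foldl_pyRange_pyGetD items ("", [])
      (fun (nd : PySem.Dict String (List (String × Int))) (pr : String × List (String × Int)) =>
        pr.2.foldl (fun nd ac => nd.modify ac.1 [] (fun l => l ++ [(pr.1, ac.2)])) nd)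
      nd0 le_rfl).trans ?_
  simp only [Int.toNat_zero, List.drop_zero, pvFlat, List.foldl_flatMap, List.foldl_map]

def pvFA (v : List (String × Int)) : List String × Int :=
  ((PySem.List.sorted v (fun x => x.2) true).map (fun pn => pn.1),
   (PySem.List.sorted v (fun x => x.2) true).foldl (fun t pn => t + pn.2) 0)

theorem pvLoopA (ks : List String) :
    ∀ (nd : PySem.Dict String (List (String × Int)))
      (fd : PySem.Dict String (List String × Int)),
    ks.Nodup → (∀ k ∈ ks, fd.contains k = false) →
    (ks.foldl
      (fun (st : PySem.Dict String (List (String × Int)) × PySem.Dict String (List String × Int)) each =>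
        (st.1.insert each (PySem.List.sorted (st.1.getD each []) (fun x => x.2) true),
         st.2.insert each
           ((PySem.List.sorted (st.1.getD each []) (fun x => x.2) true).map (fun pn => pn.1),
            (PySem.List.sorted (st.1.getD each []) (fun x => x.2) true).foldl (fun t pn => t + pn.2) 0)))
      (nd, fd)).2.items
    = fd.items ++ ks.map (fun k => (k, pvFA (nd.getD k []))) := by
  induction ks with
  | nil => intro nd fd _ _; simp
  | cons k ks ih =>
    intro nd fd hnd hfd
    simp only [List.foldl_cons]
    rw [ih _ _ (List.nodup_cons.mp hnd).2 ?hcont]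
    case hcont =>
      intro k' hk'
      rw [PySem.Dict.contains_insert]
      have hne : k' ≠ k := fun he => (List.nodup_cons.mp hnd).1 (he ▸ hk')
      simp [hne, hfd k' (List.mem_cons_of_mem _ hk')]
    rw [PySem.Dict.items_insert_of_not_contains _ _ (hfd k (List.mem_cons_self ..))]
    simp only [List.map_cons, List.append_assoc, List.singleton_append]
    congr 1
    congr 1
    apply List.map_congr_left
    intro k' hk'
    have hne : k' ≠ k := fun he => (List.nodup_cons.mp hnd).1 (he ▸ hk')
    rw [PySem.Dict.getD_insert, if_neg hne]

def pvGB (st : PySem.Dict String (List String) × PySem.Dict String Int)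
    (p : String × String × Int) :
    PySem.Dict String (List String) × PySem.Dict String Int :=
  if st.1.contains p.1 then st else (st.1.insert p.1 [], st.2.insert p.1 0)

theorem pvGB_keys (l : List (String × String × Int)) :
    ∀ st, (l.foldl pvGB st).1.keys = PySem.Set.update st.1.keys (l.map (fun p => p.1)) := by
  induction l with
  | nil => intro st; simp [PySem.Set.update]
  | cons p l ih =>
    intro st
    simp only [List.foldl_cons, List.map_cons, PySem.Set.update, ih]
    congr 1
    by_cases h : st.1.contains p.1
    · rw [pvGB, if_pos h, PySem.Set.add, PySem.Set.contains,
        if_pos (List.contains_iff_mem.mpr (by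
          have := PySem.Dict.contains_eq_decide_mem_keys st.1 p.1
          rw [h] at this; exact of_decide_eq_true this.symm))]
    · rw [pvGB, if_neg h, PySem.Set.add, PySem.Set.contains,
        if_neg (by
          intro hc
          have hm := List.contains_iff_mem.mp hc
          have := PySem.Dict.contains_eq_decide_mem_keys st.1 p.1
          rw [decide_eq_true hm] at this
          exact h this)]
      exact PySem.Dict.keys_insert_of_not_contains st.1 [] (by simpa using h)

theorem pvGB_getD1 (l : List (String × String × Int)) :
    ∀ st, (∀ b, st.1.getD b [] = ([] : List String)) →
      ∀ a, (l.foldl pvGB st).1.getD a [] = [] := by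
  induction l with
  | nil => intro st h a; exact h a
  | cons p l ih =>
    intro st h a
    refine ih _ ?_ a
    intro b
    rw [pvGB]
    by_cases hc : st.1.contains p.1
    · rw [if_pos hc]; exact h b
    · rw [if_neg hc]
      simp only [PySem.Dict.getD_insert]
      split_ifs with he
      · rfl
      · exact h b

theorem pvGB_getD2 (l : List (String × String × Int)) :
    ∀ st, (∀ b, st.2.getD b 0 = (0 : Int)) →
      ∀ a, (l.foldl pvGB st).2.getD a 0 = 0 := by
  induction l with
  | nil => intro st h a; exact h a
  | cons p l ih =>
    intro st h a
    refine ih _ ?_ a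
    intro b
    rw [pvGB]
    by_cases hc : st.1.contains p.1
    · rw [if_pos hc]; exact h b
    · rw [if_neg hc]
      simp only [PySem.Dict.getD_insert]
      split_ifs with he
      · rfl
      · exact h b

theorem pvUpdate_of_mem {s : PySem.Set String} (xs : List String) (h : ∀ x ∈ xs, x ∈ s) :
    PySem.Set.update s xs = s := by
  induction xs generalizing s with
  | nil => rfl
  | cons x xs ih =>
    have : PySem.Set.add s x = s := by
      rw [PySem.Set.add, PySem.Set.contains,
        if_pos (List.contains_iff_mem.mpr (h x (List.mem_cons_self ..)))]
    rw [PySem.Set.update, List.foldl_cons, this, ← PySem.Set.update]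
    exact ih (fun y hy => h y (List.mem_cons_of_mem _ hy))

theorem pvTotFold (l : List (String × String × Int)) :
    ∀ (d : PySem.Dict String Int) (c : String),
    (l.foldl (fun d t => d.modify t.1 0 (fun n => n + t.2.2)) d).getD c 0
      = d.getD c 0 + ((l.filter (fun t => t.1 == c)).map (fun t => t.2.2)).sum := by
  induction l with
  | nil => intro d c; simp
  | cons t l ih =>
    intro d c
    simp only [List.foldl_cons, ih, List.filter_cons]
    by_cases he : c = t.1
    · rw [if_pos (by simp [he]), PySem.Dict.getD_modify, if_pos he, he]
      simp only [List.map_cons, List.sum_cons]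
      ring
    · rw [if_neg (by simp; exact fun hx => he hx.symm), PySem.Dict.getD_modify, if_neg he]

theorem pvB_st0 (items : List (String × List (String × Int))) :
    items.foldl
      (fun (st : List (String × String × Int) × PySem.Dict String (List String) × PySem.Dict String Int) pr =>
        pr.2.foldl (fun st ac =>
          ( st.1 ++ [(ac.1, pr.1, ac.2)],
            if st.2.1.contains ac.1 then st.2 else (st.2.1.insert ac.1 [], st.2.2.insert ac.1 0))) st)
      ([], PySem.Dict.empty, PySem.Dict.empty)
    = (pvFlat items, (pvFlat items).foldl pvGB (PySem.Dict.empty, PySem.Dict.empty)) := by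
  have h1 : items.foldl
      (fun (st : List (String × String × Int) × PySem.Dict String (List String) × PySem.Dict String Int) pr =>
        pr.2.foldl (fun st ac =>
          ( st.1 ++ [(ac.1, pr.1, ac.2)],
            if st.2.1.contains ac.1 then st.2 else (st.2.1.insert ac.1 [], st.2.2.insert ac.1 0))) st)
      ([], PySem.Dict.empty, PySem.Dict.empty)
    = (pvFlat items).foldl (fun st p => (st.1 ++ [p], pvGB st.2 p))
        ([], PySem.Dict.empty, PySem.Dict.empty) := by
    rw [pvFlat, List.foldl_flatMap]
    simp only [List.foldl_map, pvGB]
  rw [h1, PySem.List.foldl_prod_mk (f := fun l p => l ++ [p]) (g := pvGB),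
    PySem.List.foldl_append_singleton, List.nil_append]

theorem pvPerAnimal (l : List (String × String × Int)) (a : String) :
    pvFA ((l.filter (fun p => p.1 == a)).map (fun p => p.2)) =
      (((PySem.List.sorted l (fun t => t.2.2) true).filter (fun t => t.1 == a)).map (fun t => t.2.1),
       0 + (((PySem.List.sorted l (fun t => t.2.2) true).filter (fun t => t.1 == a)).map (fun t => t.2.2)).sum) := by
  unfold pvFA
  have hm := pvSorted_map (fun pn : String × Int => pn.2) (fun p : String × String × Int => p.2)
      (l.filter (fun p => p.1 == a))
  rw [hm, ← pvSorted_filter (fun t : String × String × Int => t.2.2) (fun t => t.1 == a) l]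
  rw [PySem.List.foldl_add]
  simp [List.map_map, Function.comp_def]

theorem animal_locator_main (dict : List (String × List (String × Int))) :
    animal_locator dict = animal_locator_alt dict := by
  unfold animal_locator animal_locator_alt
  dsimp only [PySem.Dict.values, PySem.Dict.keys]
  rw [pvA_newdict ((PySem.Dict.ofList dict).items) PySem.Dict.empty]
  rw [pvB_st0 ((PySem.Dict.ofList dict).items)]
  dsimp only
  rw [show List.map (fun x : String × List (String × Int) => x.1)
      (List.foldl (fun nd p => nd.modify p.1 [] fun l => l ++ [p.2]) PySem.Dict.empty
        (pvFlat (PySem.Dict.ofList dict).items)).items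
    = (List.foldl (fun nd p => nd.modify p.1 [] fun l => l ++ [p.2]) PySem.Dict.empty
        (pvFlat (PySem.Dict.ofList dict).items)).keys from rfl]
  set L := pvFlat (PySem.Dict.ofList dict).items with hLdef
  set ND := List.foldl (fun nd p => nd.modify p.1 [] fun l => l ++ [p.2]) PySem.Dict.empty L with hNDdef
  set GD := List.foldl pvGB (PySem.Dict.empty, PySem.Dict.empty) L with hGDdef
  set ST := PySem.List.sorted L (fun t => t.2.2) true with hSTdef
  have hkeys : ND.keys = PySem.Set.ofList (L.map (fun p => p.1)) := by
    have h : ND.keys = PySem.Set.update PySem.Dict.empty.keys (L.map (fun p => p.1)) :=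
      PySem.Dict.keys_foldl_modify_key L (fun p => p.1) [] (fun _ p => fun l => l ++ [p.2])
        PySem.Dict.empty
    rw [PySem.Dict.keys_empty] at h
    exact h.trans (PySem.Set.update_empty _)
  have hndnodup : ND.keys.Nodup := by rw [hkeys]; exact PySem.Set.nodup_ofList _
  rw [pvLoopA ND.keys ND PySem.Dict.empty hndnodup (fun k _ => PySem.Dict.contains_empty k)]
  rw [PySem.List.foldl_prod_mk
    (f := fun (d : PySem.Dict String (List String)) (t : String × String × Int) =>
      d.modify t.1 [] fun l => l ++ [t.2.1])
    (g := fun (d : PySem.Dict String Int) (t : String × String × Int) =>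
      d.modify t.1 0 fun n => n + t.2.2)]
  dsimp only
  set PL := List.foldl (fun (d : PySem.Dict String (List String)) (t : String × String × Int) =>
    d.modify t.1 [] fun l => l ++ [t.2.1]) GD.1 ST with hPLdef
  set TT := List.foldl (fun (d : PySem.Dict String Int) (t : String × String × Int) =>
    d.modify t.1 0 fun n => n + t.2.2) GD.2 ST with hTTdef
  have hGD1 : GD.1.keys = PySem.Set.ofList (L.map (fun p => p.1)) := by
    have h : GD.1.keys = PySem.Set.update PySem.Dict.empty.keys (L.map (fun p => p.1)) :=
      pvGB_keys L (PySem.Dict.empty, PySem.Dict.empty)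
    rw [PySem.Dict.keys_empty] at h
    exact h.trans (PySem.Set.update_empty _)
  have hPLkeys : PL.keys = PySem.Set.ofList (L.map (fun p => p.1)) := by
    have h : PL.keys = PySem.Set.update GD.1.keys (ST.map (fun t => t.1)) :=
      PySem.Dict.keys_foldl_modify_key ST (fun t => t.1) [] (fun _ t => fun l => l ++ [t.2.1]) GD.1
    rw [h, hGD1]
    apply pvUpdate_of_mem
    intro x hx
    obtain ⟨t, ht, rfl⟩ := List.mem_map.mp hx
    exact (PySem.Set.mem_ofList _ _).mpr
      (List.mem_map_of_mem ((PySem.List.mem_sorted L (fun t => t.2.2) true t).mp ht))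
  have hPLnodup : PL.keys.Nodup := by rw [hPLkeys]; exact PySem.Set.nodup_ofList _
  rw [PySem.Dict.items_eq_map_keys PL hPLnodup [], List.map_map, hPLkeys, hkeys]
  rw [show (PySem.Dict.empty : PySem.Dict String (List String × Int)).items = [] from rfl,
    List.nil_append]
  apply List.map_congr_left
  intro a _
  have hNDa : ND.getD a [] = (L.filter (fun p => p.1 == a)).map (fun p => p.2) := by
    have h := PySem.Dict.getD_foldl_modify_append L PySem.Dict.empty a
    rw [PySem.Dict.getD_empty, List.nil_append] at h
    exact h
  have hPLa : PL.getD a [] = (ST.filter (fun t => t.1 == a)).map (fun t => t.2.1) := by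
    have h1 : PL = (ST.map (fun t => (t.1, t.2.1))).foldl
        (fun d p => d.modify p.1 [] fun l => l ++ [p.2]) GD.1 := by
      rw [List.foldl_map]
    have hGD1a : GD.1.getD a [] = [] :=
      pvGB_getD1 L (PySem.Dict.empty, PySem.Dict.empty) (fun b => PySem.Dict.getD_empty b []) a
    rw [h1, PySem.Dict.getD_foldl_modify_append, hGD1a, List.nil_append, List.filter_map,
      List.map_map]
    simp [Function.comp_def]
  have hTTa : TT.getD a 0 = 0 + ((ST.filter (fun t => t.1 == a)).map (fun t => t.2.2)).sum := by
    have hGD2a : GD.2.getD a 0 = 0 :=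
      pvGB_getD2 L (PySem.Dict.empty, PySem.Dict.empty) (fun b => PySem.Dict.getD_empty b 0) a
    rw [hTTdef, pvTotFold ST GD.2 a, hGD2a]
  simp only [Function.comp_def, hNDa, hPLa, hTTa, pvPerAnimal L a]
  rw [← hSTdef]

-- ===== VERDICT (by name: the statement is the Claim_ definition above) =====
theorem animal_locator_spec : Claim_equal_animal_locator := by
  intro dict _
  unfold Spec_animal_locator
  exact animal_locator_main dict
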